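-- pv_equiv track=rewrite | github.com/madskoefoed/ThinkPython | Chapter7.py | word_score
-- ===== SOURCE A (Python) =====
-- def word_score(word, available):
--     word      = word.lower()
--     available = available.lower()
--
--     # Return a score of 0 if the word is too short
--     if len(word) < 4:
--         return 0
--
--     check = True
--     for w in word:
--             if not w in available:
--                 check = False
--
--     if check:
--         if len(word) == 4:
--             score = 1
--         else:
--             score = len(word)
--     else:
--         return 0
--
--     extra = (set(word) & set(available) == set(available)) * 7
--
--     return score + extra
-- ===== SOURCE B (Python) =====
-- def word_score(word, available):
--     word = word.lower()
--     available = available.lower()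
--     if len(word) < 4:
--         return 0
--     # sorted distinct letters; one merge pass decides both subset relations
--     w = sorted(set(word))
--     a = sorted(set(available))
--     i = j = 0
--     w_sub = a_sub = True
--     while i < len(w) and j < len(a):
--         if w[i] == a[j]:
--             i += 1
--             j += 1
--         elif w[i] < a[j]:
--             w_sub = False
--             i += 1
--         else:
--             a_sub = False
--             j += 1
--     if i < len(w):
--         w_sub = False
--     if j < len(a):
--         a_sub = False
--     if not w_sub:
--         return 0
--     score = 1 if len(word) == 4 else len(word)
--     return score + 7 * a_sub
-- ===== Notes on version B (the rewrite author's own statement) =====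
-- stated objective: faster
-- what changed: Replaces A's per-character scan over the word (a substring search in `available` each iteration) and the set-intersection-equality bonus test with a sort-then-merge algorithm: the distinct letters of word and available are sorted and a single two-pointer merge pass decides both subset relations (validity and the 7-point bonus) at once.
import Mathlib
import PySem

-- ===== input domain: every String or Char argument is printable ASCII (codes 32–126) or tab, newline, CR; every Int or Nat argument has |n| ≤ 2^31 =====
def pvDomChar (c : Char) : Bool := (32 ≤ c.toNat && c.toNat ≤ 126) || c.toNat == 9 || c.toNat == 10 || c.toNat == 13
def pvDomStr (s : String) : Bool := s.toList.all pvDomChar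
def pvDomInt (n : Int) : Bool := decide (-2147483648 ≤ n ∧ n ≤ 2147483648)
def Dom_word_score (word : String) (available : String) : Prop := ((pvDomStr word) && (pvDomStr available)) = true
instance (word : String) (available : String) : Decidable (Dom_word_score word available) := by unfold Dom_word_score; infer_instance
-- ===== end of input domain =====

-- B replaces A's per-character scanning loop and intersection-equality bonus test by a sort-then-merge
-- two-pointer pass over the sorted distinct letters, deciding both subset relations at once (measured faster in a timing run).

-- ===== PORT A =====
def word_score (word : String) (available : String) : Int :=
  let w := PySem.Chars.lower word.toList
  let a := PySem.Chars.lower available.toList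
  if w.length < 4 then 0
  else
    let check := w.foldl (fun check c => if !(PySem.Chars.isIn [c] a) then false else check) true
    if check then
      let score : Int := if w.length = 4 then 1 else (w.length : Int)
      let extra : Int :=
        if PySem.Set.equal (PySem.Set.inter (PySem.Set.ofList w) (PySem.Set.ofList a)) (PySem.Set.ofList a) then 7 else 0
      score + extra
    else 0

-- ===== PORT B =====
-- B's while loop with pointers i, j and flags w_sub, a_sub, as structural recursion on the
-- remaining suffixes (advancing a pointer = dropping the head); the post-loop
-- "if i < len(w) / j < len(a)" fixups are the base cases.
def mergeScan : List Char → List Char → Bool → Bool → Bool × Bool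
  | [], a, wSub, aSub => (wSub, aSub && a.isEmpty)
  | w, [], wSub, aSub => (wSub && w.isEmpty, aSub)
  | x :: t, y :: s, wSub, aSub =>
    if x = y then mergeScan t s wSub aSub
    else if x < y then mergeScan t (y :: s) false aSub
    else mergeScan (x :: t) s wSub false
  termination_by w a => w.length + a.length

def word_score_alt (word : String) (available : String) : Int :=
  let wl := PySem.Chars.lower word.toList
  let al := PySem.Chars.lower available.toList
  if wl.length < 4 then 0
  else
    let w := PySem.List.sorted (PySem.Set.ofList wl) (fun x => x) false
    let a := PySem.List.sorted (PySem.Set.ofList al) (fun x => x) false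
    let r := mergeScan w a true true
    if !r.1 then 0
    else
      let score : Int := if wl.length = 4 then 1 else (wl.length : Int)
      score + (if r.2 then 7 else 0)

-- ===== PRECONDITION & SPEC =====
def Spec_word_score (word : String) (available : String) (out : Int) : Prop := out = word_score_alt word available
instance (word : String) (available : String) (out : Int) : Decidable (Spec_word_score word available out) := by unfold Spec_word_score; infer_instance

-- ===== CLAIM =====
def Claim_equal_word_score : Prop := ∀ (word : String) (available : String), Dom_word_score word available → Spec_word_score word available (word_score word available)

-- ===== LEMMAS AND PROOFS =====

-- A's scanning loop computes exactly "every character of w occurs in a".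
lemma check_loop_eq (w a : List Char) (acc : Bool) :
    w.foldl (fun check c => if !(PySem.Chars.isIn [c] a) then false else check) acc
      = (acc && decide (∀ c ∈ w, c ∈ a)) := by
  induction w generalizing acc with
  | nil => simp
  | cons c t ih =>
    have hc : PySem.Chars.isIn [c] a = decide (c ∈ a) := by
      rw [Bool.eq_iff_iff, PySem.Chars.isIn_iff_infix, List.singleton_infix_iff]
      simp
    simp only [List.foldl_cons, ih, hc]
    by_cases h : c ∈ a <;> simp [h]

-- A's bonus test: (wset & aset == aset) iff aset ⊆ wset
lemma bonus_eq (w a : List Char) :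
    PySem.Set.equal (PySem.Set.inter (PySem.Set.ofList w) (PySem.Set.ofList a)) (PySem.Set.ofList a)
      = decide (∀ x ∈ a, x ∈ w) := by
  rw [Bool.eq_iff_iff, PySem.Set.equal_iff]
  simp only [PySem.Set.mem_inter, PySem.Set.mem_ofList, decide_eq_true_iff]
  constructor
  · intro h x hx
    exact ((h x).mpr hx).1
  · intro h x
    exact ⟨fun ⟨_, hx⟩ => hx, fun hx => ⟨h x hx, hx⟩⟩

-- the merge pass on strictly increasing lists computes both subset relations
lemma mergeScan_eq (w a : List Char) (ws as₀ : Bool)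
    (hw : w.Pairwise (· < ·)) (ha : a.Pairwise (· < ·)) :
    mergeScan w a ws as₀ = (ws && decide (∀ x ∈ w, x ∈ a), as₀ && decide (∀ x ∈ a, x ∈ w)) := by
  revert hw ha
  fun_induction mergeScan w a ws as₀ with
  | case1 a wSub aSub =>
    intro _ _
    cases a with
    | nil => simp
    | cons hd tl =>
      have hno : ¬ (∀ x ∈ hd :: tl, x ∈ ([] : List Char)) :=
        fun h => List.not_mem_nil (h hd List.mem_cons_self)
      rw [decide_eq_false hno]
      simp
  | case2 w wSub aSub h =>
    intro _ _
    cases w with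
    | nil => simp
    | cons hd tl =>
      have hno : ¬ (∀ x ∈ hd :: tl, x ∈ ([] : List Char)) :=
        fun h => List.not_mem_nil (h hd List.mem_cons_self)
      rw [decide_eq_false hno]
      simp
  | case3 t x s wSub aSub ih =>
    intro hw ha
    rw [ih (List.Pairwise.of_cons hw) (List.Pairwise.of_cons ha)]
    have h1 : (∀ z ∈ x :: t, z ∈ x :: s) ↔ (∀ z ∈ t, z ∈ s) := by
      constructor
      · intro h z hz
        rcases List.mem_cons.mp (h z (List.mem_cons_of_mem _ hz)) with h' | h'
        · subst h'
          exact absurd (List.rel_of_pairwise_cons hw hz) (lt_irrefl _)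
        · exact h'
      · intro h z hz
        rcases List.mem_cons.mp hz with h' | h'
        · exact h' ▸ List.mem_cons_self
        · exact List.mem_cons_of_mem _ (h z h')
    have h2 : (∀ z ∈ x :: s, z ∈ x :: t) ↔ (∀ z ∈ s, z ∈ t) := by
      constructor
      · intro h z hz
        rcases List.mem_cons.mp (h z (List.mem_cons_of_mem _ hz)) with h' | h'
        · subst h'
          exact absurd (List.rel_of_pairwise_cons ha hz) (lt_irrefl _)
        · exact h'
      · intro h z hz
        rcases List.mem_cons.mp hz with h' | h'
        · exact h' ▸ List.mem_cons_self
        · exact List.mem_cons_of_mem _ (h z h')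
    rw [show decide (∀ z ∈ x :: t, z ∈ x :: s) = decide (∀ z ∈ t, z ∈ s) from decide_eq_decide.mpr h1,
        show decide (∀ z ∈ x :: s, z ∈ x :: t) = decide (∀ z ∈ s, z ∈ t) from decide_eq_decide.mpr h2]
  | case4 x t y s wSub aSub hxy hlt ih =>
    intro hw ha
    rw [ih (List.Pairwise.of_cons hw) ha]
    have h1 : ¬ (∀ z ∈ x :: t, z ∈ y :: s) := by
      intro h
      rcases List.mem_cons.mp (h x List.mem_cons_self) with h' | h'
      · exact hxy h'
      · exact absurd (List.rel_of_pairwise_cons ha h') (not_lt.mpr hlt.le)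
    have h2 : (∀ z ∈ y :: s, z ∈ x :: t) ↔ (∀ z ∈ y :: s, z ∈ t) := by
      constructor
      · intro h z hz
        rcases List.mem_cons.mp (h z hz) with h' | h'
        · exact absurd (h' ▸ hz) (by
            intro hx
            rcases List.mem_cons.mp hx with h'' | h''
            · exact hxy h''
            · exact absurd (List.rel_of_pairwise_cons ha h'') (not_lt.mpr hlt.le))
        · exact h'
      · intro h z hz
        exact List.mem_cons_of_mem _ (h z hz)
    rw [decide_eq_false h1,
        show decide (∀ z ∈ y :: s, z ∈ x :: t) = decide (∀ z ∈ y :: s, z ∈ t) from decide_eq_decide.mpr h2]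
    simp
  | case5 x t y s wSub aSub hxy hnlt ih =>
    intro hw ha
    have hylt : y < x := lt_of_le_of_ne (not_lt.mp hnlt) (fun h => hxy h.symm)
    rw [ih hw (List.Pairwise.of_cons ha)]
    have h1 : ¬ (∀ z ∈ y :: s, z ∈ x :: t) := by
      intro h
      rcases List.mem_cons.mp (h y List.mem_cons_self) with h' | h'
      · exact hxy h'.symm
      · exact absurd (List.rel_of_pairwise_cons hw h') (not_lt.mpr hylt.le)
    have h2 : (∀ z ∈ x :: t, z ∈ y :: s) ↔ (∀ z ∈ x :: t, z ∈ s) := by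
      constructor
      · intro h z hz
        rcases List.mem_cons.mp (h z hz) with h' | h'
        · exact absurd (h' ▸ hz) (by
            intro hy
            rcases List.mem_cons.mp hy with h'' | h''
            · exact hxy h''.symm
            · exact absurd (List.rel_of_pairwise_cons hw h'') (not_lt.mpr hylt.le))
        · exact h'
      · intro h z hz
        exact List.mem_cons_of_mem _ (h z hz)
    rw [decide_eq_false h1,
        show decide (∀ z ∈ x :: t, z ∈ y :: s) = decide (∀ z ∈ x :: t, z ∈ s) from decide_eq_decide.mpr h2]
    simp

-- the merge result on sorted(set(w)), sorted(set(a)) decides membership over the raw lists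
lemma mergeScan_sets (w a : List Char) :
    mergeScan (PySem.List.sorted (PySem.Set.ofList w) (fun x => x) false)
              (PySem.List.sorted (PySem.Set.ofList a) (fun x => x) false) true true
      = (decide (∀ x ∈ w, x ∈ a), decide (∀ x ∈ a, x ∈ w)) := by
  rw [mergeScan_eq _ _ _ _ (PySem.List.sorted_ofList_pairwise_lt w) (PySem.List.sorted_ofList_pairwise_lt a)]
  have hmem : ∀ (l : List Char) (x : Char),
      x ∈ PySem.List.sorted (PySem.Set.ofList l) (fun x => x) false ↔ x ∈ l := by
    intro l x
    rw [PySem.List.mem_sorted, PySem.Set.mem_ofList]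
  have h1 : (∀ x ∈ PySem.List.sorted (PySem.Set.ofList w) (fun x => x) false,
      x ∈ PySem.List.sorted (PySem.Set.ofList a) (fun x => x) false) ↔ (∀ x ∈ w, x ∈ a) := by
    constructor <;> intro h z hz
    · exact (hmem a z).mp (h z ((hmem w z).mpr hz))
    · exact (hmem a z).mpr (h z ((hmem w z).mp hz))
  have h2 : (∀ x ∈ PySem.List.sorted (PySem.Set.ofList a) (fun x => x) false,
      x ∈ PySem.List.sorted (PySem.Set.ofList w) (fun x => x) false) ↔ (∀ x ∈ a, x ∈ w) := by
    constructor <;> intro h z hz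
    · exact (hmem w z).mp (h z ((hmem a z).mpr hz))
    · exact (hmem w z).mpr (h z ((hmem a z).mp hz))
  rw [show decide (∀ x ∈ PySem.List.sorted (PySem.Set.ofList w) (fun x => x) false,
        x ∈ PySem.List.sorted (PySem.Set.ofList a) (fun x => x) false) = decide (∀ x ∈ w, x ∈ a) from decide_eq_decide.mpr h1,
      show decide (∀ x ∈ PySem.List.sorted (PySem.Set.ofList a) (fun x => x) false,
        x ∈ PySem.List.sorted (PySem.Set.ofList w) (fun x => x) false) = decide (∀ x ∈ a, x ∈ w) from decide_eq_decide.mpr h2]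
  simp

-- ===== VERDICT =====
theorem word_score_spec : Claim_equal_word_score := by
  intro word available _
  unfold Spec_word_score word_score word_score_alt
  simp only [check_loop_eq, Bool.true_and, bonus_eq, mergeScan_sets]
  by_cases hlen : (PySem.Chars.lower word.toList).length < 4
  · simp [hlen]
  · simp only [if_neg hlen]
    by_cases hP : ∀ c ∈ PySem.Chars.lower word.toList, c ∈ PySem.Chars.lower available.toList
    · rw [decide_eq_true hP]; simp
    · rw [decide_eq_false hP]; simp
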